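-- pv_equiv track=rewrite | github.com/doocs/leetcode | solution/3600-3699/3697.Compute Decimal Representation/Solution.py | decimalRepresentation
-- ===== SOURCE A (Python) =====
-- from typing import List
--
-- def decimalRepresentation(n: int) -> List[int]:
--     ans = []
--     p = 1
--     while n:
--         n, v = divmod(n, 10)
--         if v:
--             ans.append(p * v)
--         p *= 10
--     ans.reverse()
--     return ans
-- ===== SOURCE B (Python) =====
-- from typing import List
--
-- def decimalRepresentation(n: int) -> List[int]:
--     if n == 0:
--         return []
--     q, r = divmod(n, 10)
--     rest = [x * 10 for x in decimalRepresentation(q)]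
--     return rest + [r] if r else rest
-- ===== Notes on version B (the rewrite author's own statement) =====
-- stated objective: simpler
-- what changed: Replaces the iterative divmod loop that maintains a power-of-ten accumulator, appends low digits first and reverses at the end, with a direct recursion that scales the recursive result for n//10 by 10 and appends the last digit, building the answer most-significant-first with no accumulator and no reverse.
import Mathlib
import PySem

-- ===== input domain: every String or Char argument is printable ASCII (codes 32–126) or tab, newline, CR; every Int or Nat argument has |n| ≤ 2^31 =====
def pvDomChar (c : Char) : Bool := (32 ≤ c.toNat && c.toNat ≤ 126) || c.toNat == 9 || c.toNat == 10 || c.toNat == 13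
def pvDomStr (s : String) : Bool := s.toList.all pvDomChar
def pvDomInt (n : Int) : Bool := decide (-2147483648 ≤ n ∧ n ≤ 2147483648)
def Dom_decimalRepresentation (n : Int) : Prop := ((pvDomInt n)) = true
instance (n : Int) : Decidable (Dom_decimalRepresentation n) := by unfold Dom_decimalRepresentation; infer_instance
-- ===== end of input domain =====

-- B replaces A's divmod loop with power accumulator and final reverse by a direct
-- most-significant-first recursion (scale the result for n // 10 by 10, append the
-- last digit): simpler, no accumulator, no reverse.

-- ===== PORT A =====
-- Python's `while n:` loop; the guard `0 < n` only makes the recursion total: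
-- for n < 0 Python's loop never terminates (excluded by Pre_), for n = 0 both stop.
def decLoopA (n p : Int) (ans : List Int) : List Int :=
  if _h : 0 < n then
    decLoopA (PySem.Int.floordiv n 10) (p * 10)
      (if PySem.Int.mod n 10 ≠ 0 then ans ++ [p * PySem.Int.mod n 10] else ans)
  else ans
termination_by n.toNat
decreasing_by
  rw [PySem.Int.floordiv_eq_ediv_of_pos (by norm_num : (0:Int) < 10)]
  omega

def decimalRepresentation (n : Int) : List Int := (decLoopA n 1 []).reverse

-- ===== PORT B =====
-- Source B's recursion; base case `n == 0` plus the same totality guard for n < 0,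
-- where Source B's recursion never reaches the base case (excluded by Pre_).
def decimalRepresentation_alt (n : Int) : List Int :=
  if _h : 0 < n then
    let q := PySem.Int.floordiv n 10
    let r := PySem.Int.mod n 10
    let rest := (decimalRepresentation_alt q).map (fun x => x * 10)
    if r ≠ 0 then rest ++ [r] else rest
  else []
termination_by n.toNat
decreasing_by
  rw [PySem.Int.floordiv_eq_ediv_of_pos (by norm_num : (0:Int) < 10)]
  omega

-- ===== PRECONDITION & SPEC =====
-- Pre_ excludes n < 0, where Python A's `while n:` loop never terminates
-- (divmod keeps n at -1) and B recurses forever: neither program returns there.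
def Pre_decimalRepresentation (n : Int) : Prop := 0 ≤ n
instance (n : Int) : Decidable (Pre_decimalRepresentation n) := by unfold Pre_decimalRepresentation; infer_instance
def pvWitness_decimalRepresentation : Int := (90805)
def Spec_decimalRepresentation (n : Int) (out : List Int) : Prop := out = decimalRepresentation_alt n
instance (n : Int) (out : List Int) : Decidable (Spec_decimalRepresentation n out) := by unfold Spec_decimalRepresentation; infer_instance

-- ===== CLAIM (what is proved, stated in full; the proofs are below) =====
def Claim_equal_decimalRepresentation : Prop := ∀ (n : Int), Dom_decimalRepresentation n → Pre_decimalRepresentation n → Spec_decimalRepresentation n (decimalRepresentation n)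

-- ===== LEMMAS AND PROOFS =====

-- Loop invariant: A's loop with accumulator power p and accumulator list ans
-- produces ans ++ (B's most-significant-first list, scaled by p, reversed).
lemma decLoopA_eq_alt : ∀ (k : Nat) (n p : Int) (ans : List Int), n.toNat = k → 0 ≤ n →
    decLoopA n p ans = ans ++ ((decimalRepresentation_alt n).map (fun x => x * p)).reverse := by
  intro k
  induction k using Nat.strong_induction_on with
  | _ k ih =>
    intro n p ans hk hn
    by_cases h : 0 < n
    · have h10 : (0:Int) < 10 := by norm_num
      have hqe : PySem.Int.floordiv n 10 = n / 10 := PySem.Int.floordiv_eq_ediv_of_pos h10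
      have hq0 : 0 ≤ PySem.Int.floordiv n 10 := by rw [hqe]; omega
      have hlt : (PySem.Int.floordiv n 10).toNat < k := by rw [hqe]; omega
      rw [decLoopA, decimalRepresentation_alt]
      simp only [h, dif_pos]
      rw [ih _ hlt _ (p * 10) _ rfl hq0]
      have hmc : ∀ (L : List Int), List.map (fun x => x * (p * 10)) L
          = List.map (fun x => x * p) (List.map (fun x => x * 10) L) := by
        intro L
        rw [List.map_map]
        apply List.map_congr_left
        intro x _
        simp only [Function.comp]
        ring
      by_cases hv : PySem.Int.mod n 10 = 0
      · simp only [hv, ne_eq, not_true_eq_false, if_false]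
        rw [hmc]
      · simp only [hv, ne_eq, not_false_eq_true, if_true]
        rw [hmc]
        simp only [List.map_append, List.map, List.reverse_append, List.reverse_cons,
          List.reverse_nil, List.nil_append, List.cons_append, List.append_assoc]
        rw [mul_comm]
    · have hz : n = 0 := by omega
      subst hz
      rw [decLoopA, decimalRepresentation_alt]
      simp

-- ===== VERDICT (by name: the statement is the Claim_ definition above) =====
theorem decimalRepresentation_spec : Claim_equal_decimalRepresentation := by
  intro n _ hn
  unfold Spec_decimalRepresentation decimalRepresentation
  rw [decLoopA_eq_alt n.toNat n 1 [] rfl hn]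
  simp
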